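-- pv_equiv track=rewrite | github.com/mkxdxdxd/CSED342 | Assignment1/submission.py | getFrequentWords
-- ===== SOURCE A (Python) =====
-- def getFrequentWords(text, freq):
--     """
--     Splits the string |text| by whitespace
--     and returns a set of words that appear at a given frequency |freq|.
--     """
--     # BEGIN_YOUR_ANSWER (our solution is 3 lines of code, but don't worry if you deviate from this)
--     dic = {}
--     x = text.split()
--     #initialise
--     for i in range(len(x)):
--         dic[x[i]] =  0
--
--     #counting
--     for i in range(len(x)):
--         dic[x[i]] =  dic[x[i]]+1
--     #find words with a given freq
--     ans = set([])
--     for key in dic: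
--         if dic[key] == freq:
--             ans.update([key])
--     return ans
-- ===== SOURCE B (Python) =====
-- def getFrequentWords(text, freq):
--     """
--     Splits the string |text| by whitespace
--     and returns a set of words that appear at a given frequency |freq|.
--     """
--     def go(words):
--         # recursive partitioning: take the first word, drop all its occurrences,
--         # its count is the length difference; recurse on the remainder
--         if not words:
--             return []
--         w = words[0]
--         rest = [u for u in words if u != w]
--         head = [w] if len(words) - len(rest) == freq else []
--         return head + go(rest)
--     return set(go(text.split()))
-- ===== Notes on version B (the rewrite author's own statement) =====
-- stated objective: alternative
-- what changed: Replaces A's dict-based counting (init pass, increment pass, key-filter pass) by a recursive partitioning with no dictionary at all: take the first word, filter out every occurrence of it, read its count off as the length difference, recurse on the remainder, and collect matching words front-to-back.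
import Mathlib
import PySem

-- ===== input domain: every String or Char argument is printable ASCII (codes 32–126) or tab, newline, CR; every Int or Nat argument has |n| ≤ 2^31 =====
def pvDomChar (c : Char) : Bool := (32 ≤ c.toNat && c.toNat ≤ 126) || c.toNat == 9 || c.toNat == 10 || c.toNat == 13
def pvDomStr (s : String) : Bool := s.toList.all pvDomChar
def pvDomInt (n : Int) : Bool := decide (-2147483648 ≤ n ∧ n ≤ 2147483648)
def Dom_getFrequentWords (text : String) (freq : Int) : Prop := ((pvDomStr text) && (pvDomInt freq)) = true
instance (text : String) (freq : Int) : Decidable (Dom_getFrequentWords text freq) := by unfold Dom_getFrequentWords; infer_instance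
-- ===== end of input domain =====

-- B drops A's counting dict entirely: it recursively takes the first word, filters out all its
-- occurrences, reads its count off as the length difference, and recurses (alternative, not faster).

-- ===== PORT A =====
-- literal port of A: zero-init dict over range(len(x)), counting pass over range(len(x)),
-- then a pass over the dict's keys building the answer set.
-- (dic[x[i]] in the counting pass is a plain lookup of a key the first loop inserted; ported as getD _ 0, exact since the key is present.)
def getFrequentWords (text : String) (freq : Int) : List String :=
  let x := PySem.Str.split₀ text
  let dic : PySem.Dict String Int :=
    (PySem.List.pyRange 0 (x.length : Int) 1).foldl
      (fun d i => d.insert (PySem.List.pyGetD x i "") 0) PySem.Dict.empty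
  let dic2 : PySem.Dict String Int :=
    (PySem.List.pyRange 0 (x.length : Int) 1).foldl
      (fun d i => d.insert (PySem.List.pyGetD x i "") (d.getD (PySem.List.pyGetD x i "") 0 + 1)) dic
  dic2.keys.foldl
    (fun ans key => if dic2.getD key 0 == freq then PySem.Set.update ans [key] else ans)
    PySem.Set.empty

-- ===== PORT B =====
-- the inner recursive helper go(words)
def pvGo (freq : Int) (words : List String) : List String :=
  match words with
  | [] => []
  | w :: t =>
      let rest := (w :: t).filter (fun u => !(u == w))
      let head := if ((((w :: t).length : Int) - (rest.length : Int)) == freq) then [w] else []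
      head ++ pvGo freq rest
termination_by words.length
decreasing_by
  simp only [List.filter_cons, beq_self_eq_true, Bool.not_true, List.length_cons]
  exact Nat.lt_succ_of_le (List.length_filter_le _ _)

def getFrequentWords_alt (text : String) (freq : Int) : List String :=
  PySem.Set.ofList (pvGo freq (PySem.Str.split₀ text))

-- ===== PRECONDITION & SPEC =====
def Spec_getFrequentWords (text : String) (freq : Int) (out : List String) : Prop := out = getFrequentWords_alt text freq
instance (text : String) (freq : Int) (out : List String) : Decidable (Spec_getFrequentWords text freq out) := by unfold Spec_getFrequentWords; infer_instance

-- ===== CLAIM (what is proved, stated in full; the proofs are below) =====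
def Claim_equal_getFrequentWords : Prop := ∀ (text : String) (freq : Int), Dom_getFrequentWords text freq → Spec_getFrequentWords text freq (getFrequentWords text freq)

-- ===== LEMMAS AND PROOFS =====

-- a zero-init insert loop leaves every getD _ 0 at 0
theorem pv_getD_foldl_insert_zero (l : List String) (d : PySem.Dict String Int)
    (h : ∀ w, d.getD w 0 = 0) (w : String) :
    (l.foldl (fun d x => d.insert x 0) d).getD w 0 = 0 := by
  induction l generalizing d with
  | nil => exact h w
  | cons a t ih =>
      simp only [List.foldl_cons]
      exact ih _ (fun w' => by rw [PySem.Dict.getD_insert]; split <;> [rfl; exact h w'])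

-- updating a set with elements it already has leaves it unchanged
theorem pv_set_update_subset (l s : List String) (h : ∀ a ∈ l, a ∈ s) :
    PySem.Set.update s l = s := by
  induction l generalizing s with
  | nil => rfl
  | cons a t ih =>
      simp only [PySem.Set.update, List.foldl_cons] at *
      have : PySem.Set.add s a = s := by
        simp [PySem.Set.add, PySem.Set.contains, h a (by simp)]
      rw [this]
      exact ih s (fun b hb => h b (by simp [hb]))

-- the answer-building fold over nodup keys is a filter
theorem pv_foldl_if_update (ks : List String) (p : String → Bool) (acc : List String)
    (hnd : ks.Nodup) (hdisj : ∀ k ∈ ks, k ∉ acc) :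
    ks.foldl (fun s k => if p k then PySem.Set.update s [k] else s) acc
      = acc ++ ks.filter p := by
  induction ks generalizing acc with
  | nil => simp
  | cons a t ih =>
      simp only [List.foldl_cons, List.filter_cons]
      have hna : a ∉ acc := hdisj a (by simp)
      have hup : PySem.Set.update acc [a] = acc ++ [a] := by
        simp [PySem.Set.update, PySem.Set.add, PySem.Set.contains, hna]
      rcases List.nodup_cons.mp hnd with ⟨hat, hndt⟩
      by_cases hp : p a = true
      · have hd2 : ∀ k ∈ t, k ∉ acc ++ [a] := by
          intro k hk
          simp only [List.mem_append, List.mem_singleton]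
          rintro (h1 | rfl)
          · exact hdisj k (by simp [hk]) h1
          · exact hat hk
        rw [hp, if_pos rfl, hup, ih (acc ++ [a]) hndt hd2]
        simp
      · rw [if_neg (by simp [hp]), ih acc hndt (fun k hk => hdisj k (by simp [hk]))]
        simp [hp]

-- A's result over the word list is the dedup-filter normal form
theorem pv_coreA (x : List String) (freq : Int) :
    (let dic : PySem.Dict String Int :=
        (PySem.List.pyRange 0 (x.length : Int) 1).foldl
          (fun d i => d.insert (PySem.List.pyGetD x i "") 0) PySem.Dict.empty
     let dic2 : PySem.Dict String Int :=
        (PySem.List.pyRange 0 (x.length : Int) 1).foldl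
          (fun d i => d.insert (PySem.List.pyGetD x i "") (d.getD (PySem.List.pyGetD x i "") 0 + 1)) dic
     dic2.keys.foldl
        (fun ans key => if dic2.getD key 0 == freq then PySem.Set.update ans [key] else ans)
        PySem.Set.empty)
    = (PySem.List.dedup x).filter (fun w => ((PySem.List.count x w : Int) == freq)) := by
  simp only
  have e1 : (PySem.List.pyRange 0 (x.length : Int) 1).foldl
      (fun (d : PySem.Dict String Int) i => d.insert (PySem.List.pyGetD x i "") 0) PySem.Dict.empty
      = x.foldl (fun d w => d.insert w 0) PySem.Dict.empty :=
    PySem.List.foldl_pyRange_zero_pyGetD' x "" (fun (d : PySem.Dict String Int) w => d.insert w 0) PySem.Dict.empty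
  have e2 : (PySem.List.pyRange 0 (x.length : Int) 1).foldl
      (fun (d : PySem.Dict String Int) i => d.insert (PySem.List.pyGetD x i "") (d.getD (PySem.List.pyGetD x i "") 0 + 1))
      (x.foldl (fun d w => d.insert w 0) PySem.Dict.empty)
      = x.foldl (fun d w => d.insert w (d.getD w 0 + 1))
          (x.foldl (fun d w => d.insert w 0) PySem.Dict.empty) :=
    PySem.List.foldl_pyRange_zero_pyGetD' x "" (fun (d : PySem.Dict String Int) w => d.insert w (d.getD w 0 + 1)) _
  rw [e1, e2]
  set d0 : PySem.Dict String Int := x.foldl (fun d w => d.insert w 0) PySem.Dict.empty with hd0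
  set d2 : PySem.Dict String Int := x.foldl (fun d w => d.insert w (d.getD w 0 + 1)) d0 with hd2
  have hgetD : ∀ w, d2.getD w 0 = (x.count w : Int) := by
    intro w
    rw [hd2, PySem.Dict.getD_foldl_insert_add_one,
        pv_getD_foldl_insert_zero x PySem.Dict.empty (fun w => by simp [PySem.Dict.getD_empty])]
    simp
  have hkeys : d2.keys = PySem.Set.ofList x := by
    rw [hd2, PySem.Dict.keys_foldl_insert, hd0, PySem.Dict.keys_foldl_insert]
    rw [PySem.Dict.keys_empty, PySem.Set.update_nil_left]
    exact pv_set_update_subset x _ (fun a ha => (PySem.Set.mem_ofList _ _).mpr ha)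
  rw [hkeys, PySem.List.dedup_eq_ofList]
  rw [pv_foldl_if_update (PySem.Set.ofList x) (fun k => d2.getD k 0 == freq)
        PySem.Set.empty (PySem.Set.nodup_ofList x) (by intro k _ hk; simp [PySem.Set.empty] at hk)]
  have hfilter :
      (PySem.Set.ofList x).filter (fun k => d2.getD k 0 == freq)
        = (PySem.Set.ofList x).filter (fun w => ((PySem.List.count x w : Int) == freq)) := by
    apply List.filter_congr
    intro a _
    rw [hgetD a, PySem.List.count_eq]
  rw [hfilter]
  rfl

theorem pv_len_split (l : List String) (p : String → Bool) :
    (l.filter p).length + (l.filter (fun x => !p x)).length = l.length := by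
  simp only [← List.countP_eq_length_filter]
  have h1 := l.length_eq_countP_add_countP p
  have h2 : List.countP (fun a => !p a) l = List.countP (fun a => decide (p a = false)) l :=
    List.countP_congr (by intro a _; simp)
  simp only [Bool.not_eq_true] at h1
  omega

theorem pv_foldl_add_cons (l : List String) (s : List String) (a : String) (h : a ∉ l) :
    l.foldl PySem.Set.add (a :: s) = a :: l.foldl PySem.Set.add s := by
  induction l generalizing s with
  | nil => rfl
  | cons b t ih =>
      have hba : (b == a) = false := by
        simp only [beq_eq_false_iff_ne]; rintro rfl; exact h (by simp)
      simp only [List.foldl_cons]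
      have : PySem.Set.add (a :: s) b = a :: PySem.Set.add s b := by
        simp only [PySem.Set.add, PySem.Set.contains, List.contains_cons, hba, Bool.false_or]
        split <;> simp
      rw [this]
      exact ih (PySem.Set.add s b) (fun hb => h (by simp [hb]))

theorem pv_foldl_add_skip (l : List String) (s : List String) (a : String) (h : a ∈ s) :
    l.foldl PySem.Set.add s = (l.filter (fun u => !(u == a))).foldl PySem.Set.add s := by
  induction l generalizing s with
  | nil => rfl
  | cons b t ih =>
      by_cases hb : b = a
      · subst hb
        have hadd : PySem.Set.add s b = s := by
          simp [PySem.Set.add, PySem.Set.contains, h]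
        simp only [List.filter_cons, beq_self_eq_true, Bool.not_true, List.foldl_cons, hadd]
        exact ih s h
      · have hmem : a ∈ PySem.Set.add s b := by
          simp only [PySem.Set.add]; split
          · exact h
          · exact List.mem_append_left _ h
        simp only [List.filter_cons, beq_eq_false_iff_ne.mpr hb, Bool.not_false,
          List.foldl_cons]
        exact ih _ hmem

theorem pv_dedup_cons_filter (w : String) (t : List String) :
    PySem.List.dedup (w :: t) = w :: PySem.List.dedup (t.filter (fun u => !(u == w))) := by
  simp only [PySem.List.dedup_eq_ofList, PySem.Set.ofList_eq_foldl]
  rw [List.foldl_cons]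
  have h0 : PySem.Set.add ([] : List String) w = [w] := rfl
  rw [h0, pv_foldl_add_skip t [w] w (by simp),
      pv_foldl_add_cons _ [] w (by intro hw; simp at hw)]

theorem pv_go_eq (freq : Int) : ∀ (n : Nat) (x : List String), x.length ≤ n →
    pvGo freq x = (PySem.List.dedup x).filter (fun w => ((PySem.List.count x w : Int) == freq)) := by
  intro n
  induction n with
  | zero =>
      intro x hx
      have : x = [] := List.eq_nil_of_length_eq_zero (Nat.le_zero.mp hx)
      subst this; rw [pvGo]; rfl
  | succ n ih =>
      intro x hx
      match x with
      | [] => rw [pvGo]; rfl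
      | w :: t =>
        rw [pvGo]
        simp only [List.filter_cons, beq_self_eq_true, Bool.not_true, Bool.false_eq_true,
          if_false, List.length_cons]
        set rest := t.filter (fun u => !(u == w)) with hrest
        have hlen : rest.length ≤ n := by
          rw [hrest]
          have := List.length_filter_le (fun u => !(u == w)) t
          simp only [List.length_cons] at hx
          omega
        have hcount : (w :: t).count w + rest.length = t.length + 1 := by
          have hsplit := pv_len_split t (fun u => u == w)
          have hc : t.count w = (t.filter (fun u => u == w)).length := by
            rw [List.count_eq_length_filter]
          have hcc : (w :: t).count w = t.count w + 1 := by simp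
          rw [hrest]
          omega
        have hb : ((((t.length : Int) + 1) - (rest.length : Int)) == freq)
            = (((PySem.List.count (w :: t) w : Int)) == freq) := by
          have : ((t.length : Int) + 1) - (rest.length : Int) = ((w :: t).count w : Int) := by
            omega
          rw [this]; rfl
        rw [pv_dedup_cons_filter, List.filter_cons]
        simp only [← hrest]
        have htail :
            (PySem.List.dedup rest).filter (fun u => ((PySem.List.count (w :: t) u : Int) == freq))
              = (PySem.List.dedup rest).filter (fun u => ((PySem.List.count rest u : Int) == freq)) := by
          apply List.filter_congr
          intro u hu
          have hur : u ∈ rest := (PySem.List.mem_dedup _ _).mp hu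
          have huw : (u == w) = false := by
            have := (List.mem_filter.mp (hrest ▸ hur)).2
            simpa using this
          have h1 : (w :: t).count u = t.count u :=
            List.count_cons_of_ne (Ne.symm (beq_eq_false_iff_ne.mp huw))
          have h2 : rest.count u = t.count u := by
            rw [hrest, List.count_filter]
            simp [huw]
          simp only [PySem.List.count_eq] at *
          rw [h1, h2]
        rw [ih rest hlen]
        by_cases hcond : (((t.length : Int) + 1) - (rest.length : Int)) = freq
        · rw [if_pos (by exact beq_iff_eq.mpr hcond)]
          have : ((PySem.List.count (w :: t) w : Int) == freq) = true := by rw [← hb]; exact beq_iff_eq.mpr hcond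
          rw [this, if_pos rfl, htail]
          rfl
        · rw [if_neg (by simpa using hcond)]
          have : ((PySem.List.count (w :: t) w : Int) == freq) = false := by
            rw [← hb]; simpa using hcond
          rw [this, if_neg (by simp), htail]
          rfl

-- ===== VERDICT (by name: the statement is the Claim_ definition above) =====
theorem getFrequentWords_spec : Claim_equal_getFrequentWords := by
  intro text freq _
  unfold Spec_getFrequentWords getFrequentWords getFrequentWords_alt
  rw [pv_coreA (PySem.Str.split₀ text) freq,
      pv_go_eq freq (PySem.Str.split₀ text).length _ le_rfl]
  exact (PySem.Set.ofList_eq_self_of_nodup _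
    ((PySem.List.nodup_dedup (PySem.Str.split₀ text)).filter _)).symm
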